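-- pv_equiv track=rewrite | github.com/pandeysakshi8989/PYTHON | hackerank/h10.py | SumOfLeaders
-- ===== SOURCE A (Python) =====
-- def SumOfLeaders(arr, n):
--     if not arr or n == 0:
--         return -1
--
--     leaders = []
--     max_from_right = arr[-1]
--     leaders.append(max_from_right)
--
--     for i in range(n-2, -1, -1):
--         if arr[i] > max_from_right:
--             leaders.append(arr[i])
--             max_from_right = arr[i]
--
--     return sum(leaders)
-- ===== SOURCE B (Python) =====
-- def SumOfLeaders(arr, n):
--     if not arr or n == 0:
--         return -1
--     last = arr[-1]
--     seg = arr[:max(n - 1, 0)]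
--     # suffix maxima: rmaxs[i] = max of last and seg[i+1:]
--     rmaxs = []
--     rmax = last
--     for x in reversed(seg):
--         rmaxs.append(rmax)
--         if x > rmax:
--             rmax = x
--     rmaxs.reverse()
--     total = 0
--     for x, m in zip(seg, rmaxs):
--         if x > m:
--             total += x
--     return last + total
-- ===== Notes on version B (the rewrite author's own statement) =====
-- stated objective: alternative
-- what changed: B precomputes the suffix-maximum (seeded with arr[-1]) for each of the first n-1 positions in one reverse pass, then sums the elements that strictly exceed their right-side maximum in a separate zip pass, instead of A's single reverse scan that collects leaders into a list with a running max and sums them.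
import Mathlib
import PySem

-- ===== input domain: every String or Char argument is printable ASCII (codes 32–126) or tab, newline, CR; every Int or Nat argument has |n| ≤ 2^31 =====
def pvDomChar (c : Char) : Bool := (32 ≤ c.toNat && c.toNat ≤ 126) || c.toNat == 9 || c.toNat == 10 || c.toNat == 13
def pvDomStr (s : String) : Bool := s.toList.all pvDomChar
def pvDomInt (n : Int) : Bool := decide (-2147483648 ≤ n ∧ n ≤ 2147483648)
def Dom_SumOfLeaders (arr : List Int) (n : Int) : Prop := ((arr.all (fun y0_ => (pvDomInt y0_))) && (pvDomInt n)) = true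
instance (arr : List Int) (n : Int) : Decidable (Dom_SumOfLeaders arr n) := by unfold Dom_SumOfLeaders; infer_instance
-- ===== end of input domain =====

-- B replaces A's single reverse scan (running max + leaders list) by a suffix-maxima
-- precomputation followed by a zip-filter-sum pass; same cost, different decomposition.

-- ===== PORT A =====
def SumOfLeaders (arr : List Int) (n : Int) : Int :=
  if arr = [] ∨ n = 0 then -1
  else
    let m0 := PySem.List.pyGetD arr (-1) 0
    let st := (PySem.List.pyRange (n - 2) (-1) (-1)).foldl
      (fun (st : List Int × Int) i =>
        let x := PySem.List.pyGetD arr i 0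
        if x > st.2 then (st.1 ++ [x], x) else st)
      ([m0], m0)
    st.1.foldl (· + ·) 0

-- ===== PORT B =====
def SumOfLeaders_alt (arr : List Int) (n : Int) : Int :=
  if arr = [] ∨ n = 0 then -1
  else
    let last := PySem.List.pyGetD arr (-1) 0
    let seg := PySem.List.slice arr none (some (max (n - 1) 0))
    let p := seg.reverse.foldl
      (fun (p : List Int × Int) x =>
        (p.1 ++ [p.2], if x > p.2 then x else p.2))
      ([], last)
    let rmaxs := p.1.reverse
    last + (seg.zip rmaxs).foldl (fun s q => if q.1 > q.2 then s + q.1 else s) 0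

-- ===== PRECONDITION & SPEC =====
-- Pre_ excludes exactly the inputs where A raises IndexError: non-empty arr with n > len(arr)+1.
def Pre_SumOfLeaders (arr : List Int) (n : Int) : Prop :=
  arr = [] ∨ n ≤ (arr.length : Int) + 1
instance (arr : List Int) (n : Int) : Decidable (Pre_SumOfLeaders arr n) := by
  unfold Pre_SumOfLeaders; infer_instance
def pvWitness_SumOfLeaders : List Int × Int := ([16, 17, 4, 3, 5, 2], 6)

def Spec_SumOfLeaders (arr : List Int) (n : Int) (out : Int) : Prop := out = SumOfLeaders_alt arr n
instance (arr : List Int) (n : Int) (out : Int) : Decidable (Spec_SumOfLeaders arr n out) := by unfold Spec_SumOfLeaders; infer_instance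

-- ===== CLAIM (what is proved, stated in full; the proofs are below) =====
def Claim_equal_SumOfLeaders : Prop := ∀ (arr : List Int) (n : Int), Dom_SumOfLeaders arr n → Pre_SumOfLeaders arr n → Spec_SumOfLeaders arr n (SumOfLeaders arr n)

-- ===== LEMMAS AND PROOFS =====

-- A's leader-selection recursion: sum of elements strictly above the running max.
def leadSum : List Int → Int → Int
  | [], _ => 0
  | x :: ys, m => if x > m then x + leadSum ys x else leadSum ys m

-- B's suffix-max list, in processing (reversed) order.
def rmaxList : List Int → Int → List Int
  | [], _ => []
  | x :: ys, m => m :: rmaxList ys (if x > m then x else m)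

def zsum (l : List (Int × Int)) : Int := (l.map (fun p => if p.1 > p.2 then p.1 else 0)).sum

lemma zsum_cons (p : Int × Int) (l : List (Int × Int)) :
    zsum (p :: l) = (if p.1 > p.2 then p.1 else 0) + zsum l := by
  simp [zsum]

lemma foldl_add_shift (l : List Int) (c : Int) :
    l.foldl (· + ·) c = c + l.foldl (· + ·) 0 := by
  induction l generalizing c with
  | nil => simp
  | cons x l ih => rw [List.foldl_cons, List.foldl_cons, ih (c + x), ih (0 + x)]; ring

lemma foldA_eq (ys : List Int) (acc : List Int) (m : Int) :
    List.foldl (· + ·) 0 ((ys.foldl (fun (st : List Int × Int) x =>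
        if x > st.2 then (st.1 ++ [x], x) else st) (acc, m)).1)
      = List.foldl (· + ·) 0 acc + leadSum ys m := by
  induction ys generalizing acc m with
  | nil => simp [leadSum]
  | cons x ys ih =>
    by_cases h : x > m
    · simp only [List.foldl_cons, leadSum, h, if_pos, ih]
      rw [List.foldl_append, List.foldl_cons, List.foldl_nil, foldl_add_shift]
      ring
    · simp only [List.foldl_cons, leadSum, h, if_false, ih]

lemma foldB_eq (ys : List Int) (acc : List Int) (m : Int) :
    (ys.foldl (fun (p : List Int × Int) x =>
        (p.1 ++ [p.2], if x > p.2 then x else p.2)) (acc, m)).1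
      = acc ++ rmaxList ys m := by
  induction ys generalizing acc m with
  | nil => simp [rmaxList]
  | cons x ys ih => simp [List.foldl_cons, ih, rmaxList]

lemma foldZ_eq (l : List (Int × Int)) (c : Int) :
    l.foldl (fun s q => if q.1 > q.2 then s + q.1 else s) c = c + zsum l := by
  induction l generalizing c with
  | nil => simp [zsum]
  | cons q l ih =>
    by_cases h : q.1 > q.2 <;> simp only [List.foldl_cons, h, if_pos, if_false, ih, zsum_cons] <;> ring

lemma rmaxList_length (ys : List Int) (m : Int) : (rmaxList ys m).length = ys.length := by
  induction ys generalizing m with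
  | nil => rfl
  | cons x ys ih => simp [rmaxList, ih]

lemma zsum_reverse (l : List (Int × Int)) : zsum l.reverse = zsum l := by
  simp [zsum]

lemma zip_reverse_eq {α β : Type} (l1 : List α) (l2 : List β) (h : l1.length = l2.length) :
    l1.reverse.zip l2.reverse = (l1.zip l2).reverse := by
  induction l1 generalizing l2 with
  | nil =>
    cases l2 with
    | nil => simp
    | cons y l2 => simp at h
  | cons x l1 ih =>
    cases l2 with
    | nil => simp at h
    | cons y l2 =>
      simp only [List.length_cons, Nat.add_right_cancel_iff] at h
      simp only [List.reverse_cons, List.zip_cons_cons]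
      rw [List.zip_append (by simpa using h), ih l2 h]
      simp

lemma zsum_zip_rmax (ys : List Int) (m : Int) :
    zsum (ys.zip (rmaxList ys m)) = leadSum ys m := by
  induction ys generalizing m with
  | nil => simp [zsum, rmaxList, leadSum]
  | cons x ys ih =>
    simp only [rmaxList, List.zip_cons_cons, zsum_cons, leadSum]
    by_cases h : x > m <;> simp [h, ih]

lemma zsum_zip_rev (ys : List Int) (m : Int) :
    zsum (ys.reverse.zip ((rmaxList ys m).reverse)) = leadSum ys m := by
  rw [zip_reverse_eq _ _ (rmaxList_length ys m).symm, zsum_reverse, zsum_zip_rmax]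

lemma main_core (seg : List Int) (m0 : Int) :
    List.foldl (· + ·) 0 ((seg.reverse.foldl (fun (st : List Int × Int) x =>
        if x > st.2 then (st.1 ++ [x], x) else st) ([m0], m0)).1)
      = m0 + (seg.zip ((seg.reverse.foldl (fun (p : List Int × Int) x =>
          (p.1 ++ [p.2], if x > p.2 then x else p.2)) ([], m0)).1.reverse)).foldl
          (fun s q => if q.1 > q.2 then s + q.1 else s) 0 := by
  rw [foldA_eq, foldB_eq, List.nil_append, foldZ_eq]
  have h := zsum_zip_rev (seg.reverse) m0
  rw [List.reverse_reverse] at h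
  rw [h]
  simp

lemma map_pyGetD_range_take (arr : List Int) (m : Nat) (hm : m ≤ arr.length) :
    (PySem.List.pyRange 0 (m : Int) 1).map (fun i => PySem.List.pyGetD arr i 0)
      = arr.take m := by
  induction m with
  | zero => simp [PySem.List.pyRange_one_eq_nil]
  | succ k ih =>
    rw [show ((k + 1 : Nat) : Int) = (k : Int) + 1 by push_cast; ring,
        PySem.List.pyRange_one_succ_right (a := 0) (b := (k : Int)) (by omega)]
    rw [List.map_append, ih (by omega)]
    have hkl : k < arr.length := by omega
    simp only [List.map_cons, List.map_nil, PySem.List.pyGetD_natCast]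
    rw [List.getD_eq_getElem?_getD, List.getElem?_eq_getElem hkl, List.take_add_one,
        List.getElem?_eq_getElem hkl]
    simp

-- ===== VERDICT (by name: the statement is the Claim_ definition above) =====
theorem SumOfLeaders_spec : Claim_equal_SumOfLeaders := by
  intro arr n _ hpre
  unfold Spec_SumOfLeaders SumOfLeaders SumOfLeaders_alt
  by_cases hg : arr = [] ∨ n = 0
  · rw [if_pos hg, if_pos hg]
  · rw [if_neg hg, if_neg hg]
    have hne : arr ≠ [] := fun h => hg (Or.inl h)
    have hlen : (n - 1).toNat ≤ arr.length := by
      rcases hpre with h | h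
      · exact absurd h hne
      · omega
    have hseg : PySem.List.slice arr none (some (max (n - 1) 0)) = arr.take (n - 1).toNat := by
      rw [PySem.List.slice_to (xs := arr) (b := max (n - 1) 0) (by omega)]
      congr 1
      omega
    have hrange : PySem.List.pyRange (n - 2) (-1) (-1)
        = (PySem.List.pyRange 0 (((n - 1).toNat : Nat) : Int) 1).reverse := by
      rw [PySem.List.pyRange_neg_one_eq_reverse]
      norm_num
      by_cases h : 0 ≤ n - 1
      · congr 1
        omega
      · rw [PySem.List.pyRange_one_eq_nil (by omega),
            PySem.List.pyRange_one_eq_nil (by omega)]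
    have hmap := map_pyGetD_range_take arr (n - 1).toNat hlen
    have hfoldA : ∀ (m0 : Int),
        (PySem.List.pyRange (n - 2) (-1) (-1)).foldl
          (fun (st : List Int × Int) i =>
            if PySem.List.pyGetD arr i 0 > st.2
            then (st.1 ++ [PySem.List.pyGetD arr i 0], PySem.List.pyGetD arr i 0) else st)
          ([m0], m0)
        = ((arr.take (n - 1).toNat).reverse).foldl
            (fun (st : List Int × Int) x => if x > st.2 then (st.1 ++ [x], x) else st)
            ([m0], m0) := by
      intro m0
      rw [hrange, ← hmap, ← List.map_reverse, List.foldl_map]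
    simp only [hfoldA, hseg]
    exact main_core (arr.take (n - 1).toNat) (PySem.List.pyGetD arr (-1) 0)
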